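-- pv_equiv track=rewrite | github.com/teyter/SARS-CoV-2_sequencing | Stradi.py | get_start_and_end_ofxinterval
-- ===== SOURCE A (Python) =====
-- def get_start_and_end_ofxinterval(li):
--     ret = []
--     ret.append(li[0])
--     for i in range(len(li)-1):
--         if li[i] != li[i+1]-1:
--             ret.append(li[i])
--             ret.append(li[i+1])
--     ret.append(li[-1])
--     return ret
-- ===== SOURCE B (Python) =====
-- def get_start_and_end_ofxinterval(li):
--     out = []
--     i = 0
--     n = len(li)
--     while i < n:
--         j = i
--         while j + 1 < n and li[j + 1] == li[j] + 1:
--             j += 1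
--         out.append(li[i])
--         out.append(li[j])
--         i = j + 1
--     return out
-- ===== Notes on version B (the rewrite author's own statement) =====
-- stated objective: alternative
-- what changed: B replaces A's single pass over all adjacent index pairs (emitting boundary pairs at each break) by a two-pointer scan that advances an inner pointer to the end of each maximal consecutive run and emits the run's first and last element.
import Mathlib
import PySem

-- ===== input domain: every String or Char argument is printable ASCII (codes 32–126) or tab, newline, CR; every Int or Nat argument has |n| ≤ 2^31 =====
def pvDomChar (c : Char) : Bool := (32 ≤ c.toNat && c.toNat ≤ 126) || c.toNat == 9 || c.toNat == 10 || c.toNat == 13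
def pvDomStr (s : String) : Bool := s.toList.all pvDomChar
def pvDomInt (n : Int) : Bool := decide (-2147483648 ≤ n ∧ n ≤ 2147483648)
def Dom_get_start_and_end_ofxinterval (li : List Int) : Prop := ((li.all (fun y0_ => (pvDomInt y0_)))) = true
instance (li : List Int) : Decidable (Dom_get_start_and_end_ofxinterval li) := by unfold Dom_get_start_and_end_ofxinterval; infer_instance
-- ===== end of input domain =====

-- B replaces A's pass over all adjacent index pairs by a two-pointer scan over maximal
-- consecutive runs, emitting each run's first and last element (objective: alternative).

-- ===== PORT A =====
def get_start_and_end_ofxinterval (li : List Int) : List Int :=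
  let ret : List Int := []
  let ret := ret ++ [(PySem.List.pyGet? li 0).getD 0]       -- ret.append(li[0]); empty li is excluded by Pre_
  let ret := (List.range (li.length - 1)).foldl
    (fun r i =>
      if li.getD i 0 ≠ li.getD (i + 1) 0 - 1 then          -- indices i, i+1 are in range for i ∈ range(len-1)
        r ++ [li.getD i 0, li.getD (i + 1) 0]
      else r) ret
  ret ++ [(PySem.List.pyGet? li (-1)).getD 0]               -- ret.append(li[-1])

-- ===== PORT B =====
-- inner while loop of Source B: advance j to the end of the maximal consecutive run
def pvRunEnd (li : List Int) (n j : Nat) : Nat :=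
  if h : j + 1 < n ∧ li.getD (j + 1) 0 = li.getD j 0 + 1 then pvRunEnd li n (j + 1) else j
termination_by n - j
decreasing_by omega

-- needed by the outer loop's termination
theorem pvRunEnd_ge (li : List Int) (n j : Nat) : j ≤ pvRunEnd li n j := by
  rw [pvRunEnd]
  split
  · have := pvRunEnd_ge li n (j + 1); omega
  · exact Nat.le_refl j
termination_by n - j
decreasing_by omega

-- outer while loop of Source B
def pvAltGo (li : List Int) (n i : Nat) : List Int :=
  if i < n then
    li.getD i 0 :: li.getD (pvRunEnd li n i) 0 :: pvAltGo li n (pvRunEnd li n i + 1)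
  else []
termination_by n - i
decreasing_by have := pvRunEnd_ge li n i; omega

def get_start_and_end_ofxinterval_alt (li : List Int) : List Int :=
  pvAltGo li li.length 0

-- ===== PRECONDITION & SPEC =====
-- Pre_ excludes only the empty list, on which A raises IndexError (li[0]).
def Pre_get_start_and_end_ofxinterval (li : List Int) : Prop := li ≠ []
instance (li : List Int) : Decidable (Pre_get_start_and_end_ofxinterval li) := by
  unfold Pre_get_start_and_end_ofxinterval; infer_instance

def pvWitness_get_start_and_end_ofxinterval : List Int := [1, 2, 3, 7, 9, 10]

def Spec_get_start_and_end_ofxinterval (li : List Int) (out : List Int) : Prop :=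
  out = get_start_and_end_ofxinterval_alt li
instance (li : List Int) (out : List Int) : Decidable (Spec_get_start_and_end_ofxinterval li out) := by
  unfold Spec_get_start_and_end_ofxinterval; infer_instance

-- ===== CLAIM (what is proved, stated in full; the proofs are below) =====
def Claim_equal_get_start_and_end_ofxinterval : Prop :=
  ∀ (li : List Int), Dom_get_start_and_end_ofxinterval li →
    Pre_get_start_and_end_ofxinterval li →
    Spec_get_start_and_end_ofxinterval li (get_start_and_end_ofxinterval li)

-- ===== LEMMAS AND PROOFS =====

-- the break-pair list A accumulates, expressed structurally
def pvBreaks : List Int → List Int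
  | x :: y :: t => (if x ≠ y - 1 then [x, y] else []) ++ pvBreaks (y :: t)
  | _ => []

-- structural version of Source B's inner while loop: (last element of the run, remainder)
def pvRunSplit : Int → List Int → Int × List Int
  | x, y :: t => if y = x + 1 then pvRunSplit y t else (x, y :: t)
  | x, [] => (x, [])

theorem pvRunSplit_len (x : Int) (t : List Int) : (pvRunSplit x t).2.length ≤ t.length := by
  induction t generalizing x with
  | nil => simp [pvRunSplit]
  | cons y t' ih =>
    simp only [pvRunSplit]
    split
    · exact Nat.le_trans (ih y) (Nat.le_succ _)
    · exact Nat.le_refl _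

-- structural version of Source B's outer loop
def pvBspec : List Int → List Int
  | [] => []
  | x :: t => x :: (pvRunSplit x t).1 :: pvBspec (pvRunSplit x t).2
termination_by l => l.length
decreasing_by simp; have := pvRunSplit_len x t; omega

theorem pvRunEnd_spec (li : List Int) (n j : Nat) (hn : n = li.length) (hj : j < n) :
    pvRunSplit (li.getD j 0) (li.drop (j + 1)) =
      (li.getD (pvRunEnd li n j) 0, li.drop (pvRunEnd li n j + 1)) := by
  rw [pvRunEnd]
  split
  · rename_i h
    have hlt : j + 1 < li.length := by omega
    have hdrop : li.drop (j + 1) = li.getD (j + 1) 0 :: li.drop (j + 2) := by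
      rw [List.drop_eq_getElem_cons hlt, List.getD_eq_getElem li 0 hlt]
    rw [hdrop, pvRunSplit, if_pos h.2]
    exact pvRunEnd_spec li n (j + 1) hn (by omega)
  · rename_i h
    by_cases hlt : j + 1 < n
    · have hne : li.getD (j + 1) 0 ≠ li.getD j 0 + 1 := fun he => h ⟨hlt, he⟩
      have hlt' : j + 1 < li.length := by omega
      have hdrop : li.drop (j + 1) = li.getD (j + 1) 0 :: li.drop (j + 2) := by
        rw [List.drop_eq_getElem_cons hlt', List.getD_eq_getElem li 0 hlt']
      rw [hdrop, pvRunSplit, if_neg hne, ← hdrop]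
    · have : li.drop (j + 1) = [] := List.drop_eq_nil_of_le (by omega)
      rw [this, pvRunSplit]
termination_by n - j
decreasing_by omega

theorem pvAltGo_eq_bspec (li : List Int) (n i : Nat) (hn : n = li.length) :
    pvAltGo li n i = pvBspec (li.drop i) := by
  rw [pvAltGo]
  split
  · rename_i hi
    have hi' : i < li.length := by omega
    have hdrop : li.drop i = li.getD i 0 :: li.drop (i + 1) := by
      rw [List.drop_eq_getElem_cons hi', List.getD_eq_getElem li 0 hi']
    rw [hdrop, pvBspec, pvRunEnd_spec li n i hn hi]
    have hge := pvRunEnd_ge li n i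
    simp only []
    rw [pvAltGo_eq_bspec li n (pvRunEnd li n i + 1) hn]
  · rename_i hi
    rw [List.drop_eq_nil_of_le (by omega), pvBspec]
termination_by n - i
decreasing_by have := pvRunEnd_ge li n i; omega

theorem pvBspec_eq_breaks (x : Int) (t : List Int) :
    (pvRunSplit x t).1 :: pvBspec (pvRunSplit x t).2 =
      pvBreaks (x :: t) ++ [(x :: t).getLastD 0] := by
  induction t generalizing x with
  | nil => simp [pvRunSplit, pvBspec, pvBreaks]
  | cons y t' ih =>
    by_cases hy : y = x + 1
    · have hx : ¬ x ≠ y - 1 := by omega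
      simp only [pvRunSplit, if_pos hy, pvBreaks, if_neg hx, List.nil_append]
      rw [ih y]
      simp [List.getLastD]
    · have hx : x ≠ y - 1 := by omega
      simp only [pvRunSplit, if_neg hy, pvBreaks, if_pos hx]
      rw [pvBspec, ih y]
      simp [List.getLastD]

theorem pvFoldl_flat (c : Nat → Prop) [DecidablePred c] (f : Nat → List Int)
    (l : List Nat) (acc : List Int) :
    l.foldl (fun r i => if c i then r ++ f i else r) acc =
      acc ++ l.flatMap (fun i => if c i then f i else []) := by
  induction l generalizing acc with
  | nil => simp
  | cons a l ih =>
    simp only [List.foldl_cons, List.flatMap_cons, ih]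
    split <;> simp

theorem pvFlat_eq_breaks (x : Int) (t : List Int) :
    (List.range ((x :: t).length - 1)).flatMap
      (fun i => if (x :: t).getD i 0 ≠ (x :: t).getD (i + 1) 0 - 1 then
                  [(x :: t).getD i 0, (x :: t).getD (i + 1) 0] else []) =
      pvBreaks (x :: t) := by
  induction t generalizing x with
  | nil => simp [pvBreaks]
  | cons y t' ih =>
    have hlen : (x :: y :: t').length - 1 = ((y :: t').length - 1) + 1 := by simp
    rw [hlen, List.range_succ_eq_map, List.flatMap_cons, List.flatMap_map]
    have hrest : ∀ i : Nat,
        (fun i => if (x :: y :: t').getD i 0 ≠ (x :: y :: t').getD (i + 1) 0 - 1 then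
            [(x :: y :: t').getD i 0, (x :: y :: t').getD (i + 1) 0] else []) (Nat.succ i) =
        (fun i => if (y :: t').getD i 0 ≠ (y :: t').getD (i + 1) 0 - 1 then
            [(y :: t').getD i 0, (y :: t').getD (i + 1) 0] else []) i := by
      intro i; simp
    rw [funext hrest, ih y, pvBreaks]
    simp [List.getD]

theorem pvA_char (x : Int) (t : List Int) :
    get_start_and_end_ofxinterval (x :: t) =
      x :: (pvBreaks (x :: t) ++ [(x :: t).getLastD 0]) := by
  unfold get_start_and_end_ofxinterval
  simp only [List.nil_append]
  rw [pvFoldl_flat (fun i => (x :: t).getD i 0 ≠ (x :: t).getD (i + 1) 0 - 1)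
        (fun i => [(x :: t).getD i 0, (x :: t).getD (i + 1) 0]),
      pvFlat_eq_breaks]
  rw [PySem.List.pyGet?_zero_cons, PySem.List.pyGet?_neg_one]
  simp [List.getLastD_eq_getLast?, List.cons_append]

-- ===== VERDICT (by name: the statement is the Claim_ definition above) =====
theorem get_start_and_end_ofxinterval_spec : Claim_equal_get_start_and_end_ofxinterval := by
  intro li _ hpre
  obtain ⟨x, t, rfl⟩ : ∃ x t, li = x :: t := by
    cases li with
    | nil => exact absurd rfl hpre
    | cons x t => exact ⟨x, t, rfl⟩
  unfold Spec_get_start_and_end_ofxinterval get_start_and_end_ofxinterval_alt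
  rw [pvA_char, pvAltGo_eq_bspec _ _ 0 rfl, List.drop_zero, pvBspec, pvBspec_eq_breaks]
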